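-- pv_equiv track=rewrite | github.com/fcaponetto/advent_of_code | 2023/d13/01.py | get_line_point_of_incidence
-- ===== SOURCE A (Python) =====
-- def get_line_point_of_incidence(line, i: int, j: int):
--     mirrored = True
--     while i < j:
--         if line[i] != line[j]:
--             mirrored = False
--             break
--         i += 1
--         j -= 1
--
--     if mirrored:
--         return i
--     else:
--         return 0
-- ===== SOURCE B (Python) =====
-- def get_line_point_of_incidence(line, i: int, j: int):
--     if i >= j:
--         return i
--     segment = [line[k] for k in range(i, j + 1)]
--     if segment == segment[::-1]:
--         return i + (j - i + 1) // 2
--     return 0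
-- ===== Notes on version B (the rewrite author's own statement) =====
-- stated objective: simpler
-- what changed: Replaces the two-pointer early-break while loop with a one-shot palindrome test (segment == reversed segment) and a closed-form crossing index i + (j - i + 1) // 2.
import Mathlib
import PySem

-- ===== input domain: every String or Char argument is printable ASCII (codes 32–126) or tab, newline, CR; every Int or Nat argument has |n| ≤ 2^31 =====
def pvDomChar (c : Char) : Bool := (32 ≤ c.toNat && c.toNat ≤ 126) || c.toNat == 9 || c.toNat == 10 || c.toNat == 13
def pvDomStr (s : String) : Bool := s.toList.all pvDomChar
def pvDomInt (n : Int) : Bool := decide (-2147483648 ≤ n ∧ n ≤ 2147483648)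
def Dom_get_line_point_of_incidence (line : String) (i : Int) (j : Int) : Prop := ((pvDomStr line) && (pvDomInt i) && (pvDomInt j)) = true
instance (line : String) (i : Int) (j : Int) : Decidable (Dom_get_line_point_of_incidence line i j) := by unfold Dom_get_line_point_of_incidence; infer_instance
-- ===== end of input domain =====

-- B replaces A's two-pointer early-break while loop by a one-shot palindrome test on the
-- segment plus a closed-form crossing index; objective: simpler.

-- ===== PORT A =====
-- the while loop of A: state (i, j); out-of-range index is excluded by Pre_, '.getD ' '' only totalises
def pvLoopA (cs : List Char) (i j : Int) : Int :=
  if _h : i < j then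
    if (PySem.List.pyGet? cs i).getD ' ' ≠ (PySem.List.pyGet? cs j).getD ' ' then 0
    else pvLoopA cs (i + 1) (j - 1)
  else i
termination_by (j - i).toNat
decreasing_by omega

def get_line_point_of_incidence (line : String) (i : Int) (j : Int) : Int :=
  pvLoopA line.toList i j

-- ===== PORT B =====
-- segment = [line[k] for k in range(i, j+1)]
def pvSegment (cs : List Char) (i j : Int) : List Char :=
  (PySem.List.pyRange i (j + 1) 1).map (fun k => (PySem.List.pyGet? cs k).getD ' ')

-- guard, palindrome test (segment == segment reversed), closed-form crossing index
def pvAltCore (cs : List Char) (i j : Int) : Int :=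
  if i ≥ j then i
  else
    let segment := pvSegment cs i j
    if segment = segment.reverse then i + PySem.Int.floordiv (j - i + 1) 2 else 0

def get_line_point_of_incidence_alt (line : String) (i : Int) (j : Int) : Int :=
  pvAltCore line.toList i j

-- ===== PRECONDITION & SPEC =====
-- Pre_ excludes exactly the inputs where A raises IndexError: i < j with i or j
-- outside Python's index range [-len(line), len(line)-1] (B raises there too).
def Pre_get_line_point_of_incidence (line : String) (i : Int) (j : Int) : Prop :=
  i ≥ j ∨ (-(line.toList.length : Int) ≤ i ∧ j < (line.toList.length : Int))
instance (line : String) (i : Int) (j : Int) : Decidable (Pre_get_line_point_of_incidence line i j) := by unfold Pre_get_line_point_of_incidence; infer_instance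

def pvWitness_get_line_point_of_incidence : String × Int × Int := ("abcba", 0, 4)

def Spec_get_line_point_of_incidence (line : String) (i : Int) (j : Int) (out : Int) : Prop := out = get_line_point_of_incidence_alt line i j
instance (line : String) (i : Int) (j : Int) (out : Int) : Decidable (Spec_get_line_point_of_incidence line i j out) := by unfold Spec_get_line_point_of_incidence; infer_instance

-- ===== CLAIM (what is proved, stated in full; the proofs are below) =====
def Claim_equal_get_line_point_of_incidence : Prop := ∀ (line : String) (i : Int) (j : Int), Dom_get_line_point_of_incidence line i j → Pre_get_line_point_of_incidence line i j → Spec_get_line_point_of_incidence line i j (get_line_point_of_incidence line i j)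

-- ===== LEMMAS AND PROOFS =====

-- the segment from i to j splits as first char :: middle ++ last char, when i < j
theorem pvSeg_decomp (cs : List Char) (i j : Int) (h : i < j) :
    pvSegment cs i j
    = ((PySem.List.pyGet? cs i).getD ' ')
      :: pvSegment cs (i + 1) (j - 1) ++ [(PySem.List.pyGet? cs j).getD ' '] := by
  unfold pvSegment
  rw [show j - 1 + 1 = j from by omega,
      PySem.List.pyRange_one_cons (by omega : i < j + 1),
      PySem.List.pyRange_one_succ_right (by omega : i + 1 ≤ j)]
  simp

-- palindrome decomposition for a :: l ++ [b]
theorem pvPal_cons_append {α : Type} (a b : α) (l : List α) :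
    ((a :: l) ++ [b] = ((a :: l) ++ [b]).reverse) ↔ (a = b ∧ l = l.reverse) := by
  simp only [List.reverse_append, List.reverse_cons, List.reverse_nil, List.nil_append,
      List.cons_append, List.cons_eq_cons]
  constructor
  · rintro ⟨hab, h2⟩
    subst hab
    exact ⟨rfl, List.append_cancel_right h2⟩
  · rintro ⟨hab, hl⟩
    subst hab
    rw [← hl]
    exact ⟨rfl, rfl⟩

-- characterisation of B's core when i < j
theorem pvAlt_lt (cs : List Char) (i j : Int) (h : i < j) :
    pvAltCore cs i j
    = if ((PySem.List.pyGet? cs i).getD ' ' = (PySem.List.pyGet? cs j).getD ' '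
          ∧ pvSegment cs (i + 1) (j - 1) = (pvSegment cs (i + 1) (j - 1)).reverse)
      then i + PySem.Int.floordiv (j - i + 1) 2 else 0 := by
  simp only [pvAltCore]
  rw [if_neg (by omega), pvSeg_decomp cs i j h]
  simp only [pvPal_cons_append]

-- main invariant: A's loop equals B's core, for every i, j
theorem pvLoop_eq_alt (cs : List Char) (i j : Int) :
    pvLoopA cs i j = pvAltCore cs i j := by
  fun_induction pvLoopA cs i j with
  | case1 i j h hne =>
    rw [pvAlt_lt cs i j h, if_neg]
    rintro ⟨h1, _⟩
    exact hne h1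
  | case2 i j h heq ih =>
    have heq' : (PySem.List.pyGet? cs i).getD ' ' = (PySem.List.pyGet? cs j).getD ' ' := by
      by_contra hc; exact heq hc
    rw [ih]
    by_cases h2 : i + 1 < j - 1
    · rw [pvAlt_lt cs (i + 1) (j - 1) h2, pvAlt_lt cs i j h,
          pvSeg_decomp cs (i + 1) (j - 1) h2]
      simp only [pvPal_cons_append]
      split_ifs with hA hB hC
      · rw [PySem.Int.floordiv_eq_ediv_of_pos (by norm_num : (0:Int) < 2),
            PySem.Int.floordiv_eq_ediv_of_pos (by norm_num : (0:Int) < 2)]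
        omega
      · exact absurd ⟨heq', hA⟩ hB
      · exact absurd hC.2 hA
      · rfl
    · rw [pvAltCore, if_pos (by omega : i + 1 ≥ j - 1), pvAlt_lt cs i j h]
      by_cases h3 : i + 1 ≥ j
      · -- j = i + 1 : the middle segment is empty
        have hseg : pvSegment cs (i + 1) (j - 1) = [] := by
          unfold pvSegment
          rw [PySem.List.pyRange_one_eq_nil (by omega : j - 1 + 1 ≤ i + 1)]
          rfl
        rw [if_pos ⟨heq', by rw [hseg]; rfl⟩,
            PySem.Int.floordiv_eq_ediv_of_pos (by norm_num : (0:Int) < 2)]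
        omega
      · -- j = i + 2 : the middle segment is one char
        have hseg : pvSegment cs (i + 1) (j - 1)
            = [(PySem.List.pyGet? cs (i + 1)).getD ' '] := by
          unfold pvSegment
          rw [show j - 1 + 1 = (i + 1) + 1 from by omega, PySem.List.pyRange_one_singleton]
          rfl
        rw [if_pos ⟨heq', by rw [hseg]; rfl⟩,
            PySem.Int.floordiv_eq_ediv_of_pos (by norm_num : (0:Int) < 2)]
        omega
  | case3 i j h =>
    rw [pvAltCore, if_pos (by omega)]

-- ===== VERDICT (by name: the statement is the Claim_ definition above) =====
theorem get_line_point_of_incidence_spec : Claim_equal_get_line_point_of_incidence := by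
  intro line i j _ _
  unfold Spec_get_line_point_of_incidence get_line_point_of_incidence get_line_point_of_incidence_alt
  exact pvLoop_eq_alt line.toList i j
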